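-- pv_equiv track=rewrite | github.com/Jan1986-cloud/svc-product-description | main.py | parse_quality_response
-- ===== SOURCE A (Python) =====
-- def parse_quality_response(response: str) -> tuple[int, str]:
--     score = 5
--     feedback = "Geen specifieke feedback beschikbaar."
--     for line in response.splitlines():
--         line = line.strip()
--         if line.startswith("SCORE:"):
--             try:
--                 score = max(1, min(10, int(line.replace("SCORE:", "").strip())))
--             except ValueError:
--                 score = 5
--         elif line.startswith("FEEDBACK:"):
--             feedback = line.replace("FEEDBACK:", "").strip()
--     return score, feedback
-- ===== SOURCE B (Python) =====
-- def _last_with_prefix(lines, prefix):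
--     for line in reversed(lines):
--         if line.startswith(prefix):
--             return line
--     return None
--
-- def parse_quality_response(response: str) -> tuple[int, str]:
--     lines = [l.strip() for l in response.splitlines()]
--     score_line = _last_with_prefix(lines, "SCORE:")
--     if score_line is None:
--         score = 5
--     else:
--         try:
--             score = max(1, min(10, int(score_line.replace("SCORE:", "").strip())))
--         except ValueError:
--             score = 5
--     fb_line = _last_with_prefix(lines, "FEEDBACK:")
--     if fb_line is None:
--         feedback = "Geen specifieke feedback beschikbaar."
--     else:
--         feedback = fb_line.replace("FEEDBACK:", "").strip()
--     return score, feedback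
-- ===== Notes on version B (the rewrite author's own statement) =====
-- stated objective: idiomatic
-- what changed: Replaces the single stateful per-line branching loop by two independent last-match extractions: strip each line once, scan the reversed line list for the last 'SCORE:' line and the last 'FEEDBACK:' line, and derive each field from its own line (or default).
import Mathlib
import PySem

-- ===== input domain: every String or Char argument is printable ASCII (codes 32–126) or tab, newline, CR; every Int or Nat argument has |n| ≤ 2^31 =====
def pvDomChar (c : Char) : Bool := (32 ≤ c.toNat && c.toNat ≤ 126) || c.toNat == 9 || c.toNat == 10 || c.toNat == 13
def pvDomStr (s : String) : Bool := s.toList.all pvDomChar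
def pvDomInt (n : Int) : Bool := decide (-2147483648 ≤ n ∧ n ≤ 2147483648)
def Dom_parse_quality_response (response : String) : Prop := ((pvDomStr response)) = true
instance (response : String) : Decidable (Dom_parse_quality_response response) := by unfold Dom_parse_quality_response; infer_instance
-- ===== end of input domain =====

-- B replaces A's single stateful branching loop by two independent last-match scans (idiomatic; same cost).

-- ===== PORT A =====
-- score = max(1, min(10, int(line.replace("SCORE:", "").strip()))) with 5 on ValueError
-- (the identical expression occurs in both Pythons; shared here)
def pqrScoreOf (line : String) : Int :=
  match PySem.Int.ofStr? (PySem.Str.strip (PySem.Str.replace line "SCORE:" "")) with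
  | some v => max 1 (min 10 v)
  | none => 5

-- feedback = line.replace("FEEDBACK:", "").strip()  (identical in both Pythons; shared)
def pqrFbOf (line : String) : String := PySem.Str.strip (PySem.Str.replace line "FEEDBACK:" "")

-- A's loop body, one step of the fold over the raw lines (strips the line itself, as A does).
def pqrStepA (st : Int × String) (rawLine : String) : Int × String :=
  let line := PySem.Str.strip rawLine
  if PySem.Str.startswith line "SCORE:" then (pqrScoreOf line, st.2)
  else if PySem.Str.startswith line "FEEDBACK:" then (st.1, pqrFbOf line)
  else st

def parse_quality_response (response : String) : Int × String :=
  (PySem.Str.splitlines response).foldl pqrStepA (5, "Geen specifieke feedback beschikbaar.")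

-- ===== PORT B =====
-- first line with the given prefix in a (reversed) list; port of _last_with_prefix
def pqrLastWith (p : String) : List String → Option String
  | [] => none
  | l :: rest => if PySem.Str.startswith l p then some l else pqrLastWith p rest

def parse_quality_response_alt (response : String) : Int × String :=
  let lines := (PySem.Str.splitlines response).map PySem.Str.strip
  let score : Int :=
    match pqrLastWith "SCORE:" lines.reverse with
    | none => 5
    | some l => pqrScoreOf l
  let feedback : String :=
    match pqrLastWith "FEEDBACK:" lines.reverse with
    | none => "Geen specifieke feedback beschikbaar."
    | some l => pqrFbOf l
  (score, feedback)

-- ===== PRECONDITION & SPEC =====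
def Spec_parse_quality_response (response : String) (out : Int × String) : Prop := out = parse_quality_response_alt response
instance (response : String) (out : Int × String) : Decidable (Spec_parse_quality_response response out) := by unfold Spec_parse_quality_response; infer_instance

-- ===== CLAIM (what is proved, stated in full; the proofs are below) =====
def Claim_equal_parse_quality_response : Prop := ∀ (response : String), Dom_parse_quality_response response → Spec_parse_quality_response response (parse_quality_response response)

-- ===== LEMMAS AND PROOFS =====

-- A's step on stripped lines (proof helper: pqrStepA rawLine = pqrStepG (strip rawLine))
def pqrStepG (st : Int × String) (line : String) : Int × String :=
  if PySem.Str.startswith line "SCORE:" then (pqrScoreOf line, st.2)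
  else if PySem.Str.startswith line "FEEDBACK:" then (st.1, pqrFbOf line)
  else st

lemma pqr_not_both (l : String) (h1 : PySem.Str.startswith l "SCORE:" = true)
    (h2 : PySem.Str.startswith l "FEEDBACK:" = true) : False := by
  rw [PySem.Str.startswith_eq, PySem.Chars.startswith_iff] at h1 h2
  obtain ⟨u, hu⟩ := h1
  obtain ⟨v, hv⟩ := h2
  rw [← hu] at hv
  have e1 : ("SCORE:".toList) = ['S','C','O','R','E',':'] := by decide
  have e2 : ("FEEDBACK:".toList) = ['F','E','E','D','B','A','C','K',':'] := by decide
  rw [e1, e2] at hv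
  simp at hv

lemma pqrLastWith_append (p : String) {α : Type} (xs : List String) (l : String) (d : α) (f : String → α) :
    (match pqrLastWith p (xs ++ [l]) with | none => d | some x => f x)
    = (match pqrLastWith p xs with
       | none => if PySem.Str.startswith l p then f l else d
       | some x => f x) := by
  induction xs with
  | nil =>
    simp only [List.nil_append, pqrLastWith]
    by_cases h : PySem.Str.startswith l p = true
    · rw [if_pos h, if_pos h]
    · rw [if_neg h, if_neg h]
  | cons y ys ih =>
    simp only [List.cons_append, pqrLastWith]
    by_cases h : PySem.Str.startswith y p = true
    · rw [if_pos h, if_pos h]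
    · rw [if_neg h, if_neg h]; exact ih

lemma pqr_foldl_eq (ls : List String) : ∀ (s : Int) (fb : String),
    List.foldl pqrStepG (s, fb) ls =
      ((match pqrLastWith "SCORE:" ls.reverse with | none => s | some l => pqrScoreOf l),
       (match pqrLastWith "FEEDBACK:" ls.reverse with | none => fb | some l => pqrFbOf l)) := by
  induction ls with
  | nil => intro s fb; rfl
  | cons l t ih =>
    intro s fb
    have h1 : (List.foldl pqrStepG (s, fb) (l :: t)) = List.foldl pqrStepG (pqrStepG (s, fb) l) t := rfl
    rw [h1, ih]
    rw [List.reverse_cons,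
        pqrLastWith_append "SCORE:" t.reverse l s pqrScoreOf,
        pqrLastWith_append "FEEDBACK:" t.reverse l fb pqrFbOf]
    have hfst : (pqrStepG (s, fb) l).1 = if PySem.Str.startswith l "SCORE:" then pqrScoreOf l else s := by
      simp only [pqrStepG]
      by_cases hs : PySem.Str.startswith l "SCORE:" = true
      · rw [if_pos hs, if_pos hs]
      · rw [if_neg hs, if_neg hs]
        by_cases hf : PySem.Str.startswith l "FEEDBACK:" = true
        · rw [if_pos hf]
        · rw [if_neg hf]
    have hsnd : (pqrStepG (s, fb) l).2 = if PySem.Str.startswith l "FEEDBACK:" then pqrFbOf l else fb := by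
      simp only [pqrStepG]
      by_cases hf : PySem.Str.startswith l "FEEDBACK:" = true
      · by_cases hs : PySem.Str.startswith l "SCORE:" = true
        · exact absurd hf (fun h => pqr_not_both l hs h)
        · rw [if_neg hs, if_pos hf, if_pos hf]
      · by_cases hs : PySem.Str.startswith l "SCORE:" = true
        · rw [if_pos hs, if_neg hf]
        · rw [if_neg hs, if_neg hf, if_neg hf]
    rw [hfst, hsnd]

-- ===== VERDICT (by name: the statement is the Claim_ definition above) =====
theorem parse_quality_response_spec : Claim_equal_parse_quality_response := by
  intro response _
  unfold Spec_parse_quality_response parse_quality_response parse_quality_response_alt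
  have hmap : (PySem.Str.splitlines response).foldl pqrStepA (5, "Geen specifieke feedback beschikbaar.")
      = ((PySem.Str.splitlines response).map PySem.Str.strip).foldl pqrStepG (5, "Geen specifieke feedback beschikbaar.") := by
    rw [List.foldl_map]; rfl
  rw [hmap, pqr_foldl_eq]
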